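-- pv_equiv track=rewrite | github.com/Shredian/review-summarizer | src/infrastructure/services/summarization/aspect_evidence_guided/aspect_candidates.py | nominal_spans_from_pos_pairs
-- ===== SOURCE A (Python) =====
-- _NOMINAL_POS = frozenset({"NOUN", "PROPN", "ADJ", "NUM"})
--
-- def nominal_spans_from_pos_pairs(
--     token_pairs: list[tuple[str, str]],
--     min_candidate_len: int,
-- ) -> list[str]:
--     """Строит строки-кандидаты из последовательностей подряд идущих NOUN/PROPN/ADJ/NUM.
--
--     token_pairs: список (текст в lower, UD pos_).
--     """
--     results: list[str] = []
--     current: list[str] = []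
--     for text, pos in token_pairs:
--         if pos in _NOMINAL_POS:
--             current.append(text)
--         else:
--             if current:
--                 candidate = " ".join(current).strip()
--                 if len(candidate) >= min_candidate_len:
--                     results.append(candidate)
--                 current = []
--     if current:
--         candidate = " ".join(current).strip()
--         if len(candidate) >= min_candidate_len:
--             results.append(candidate)
--     return results
-- ===== SOURCE B (Python) =====
-- _NOMINAL_POS = frozenset({"NOUN", "PROPN", "ADJ", "NUM"})
--
-- def nominal_spans_from_pos_pairs(token_pairs, min_candidate_len):
--     """Two-pointer run scan: find each maximal nominal run [i:j] directly, no accumulator state machine."""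
--     results = []
--     n = len(token_pairs)
--     i = 0
--     while i < n:
--         if token_pairs[i][1] in _NOMINAL_POS:
--             j = i + 1
--             while j < n and token_pairs[j][1] in _NOMINAL_POS:
--                 j += 1
--             candidate = " ".join(text for text, _ in token_pairs[i:j]).strip()
--             if len(candidate) >= min_candidate_len:
--                 results.append(candidate)
--             i = j
--         else:
--             i += 1
--     return results
-- ===== Notes on version B (the rewrite author's own statement) =====
-- stated objective: alternative
-- what changed: Replaces A's accumulator/flush state machine (building `current` token by token and flushing on non-nominal or at the end) with a two-pointer scan that locates each maximal nominal run [i:j] directly, joins that slice and advances past it.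
import Mathlib
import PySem

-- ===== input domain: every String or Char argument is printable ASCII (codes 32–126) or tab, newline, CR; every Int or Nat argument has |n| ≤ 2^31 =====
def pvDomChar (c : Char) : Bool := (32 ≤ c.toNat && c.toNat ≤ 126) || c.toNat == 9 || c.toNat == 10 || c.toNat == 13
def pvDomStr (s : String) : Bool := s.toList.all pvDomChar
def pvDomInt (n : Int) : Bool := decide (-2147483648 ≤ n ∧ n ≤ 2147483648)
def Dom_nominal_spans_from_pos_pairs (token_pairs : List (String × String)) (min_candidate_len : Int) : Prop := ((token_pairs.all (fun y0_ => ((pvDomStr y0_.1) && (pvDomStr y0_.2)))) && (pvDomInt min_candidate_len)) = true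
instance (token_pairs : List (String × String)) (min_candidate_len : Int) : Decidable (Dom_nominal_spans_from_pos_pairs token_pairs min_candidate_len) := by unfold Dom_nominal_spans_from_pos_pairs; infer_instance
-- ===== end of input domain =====

-- One line: B replaces A's accumulator/flush state machine with a two-pointer maximal-run scan (alternative decomposition, same cost).

-- _NOMINAL_POS membership (shared module constant in both Pythons)
def pvNominal (p : String) : Bool := (["NOUN", "PROPN", "ADJ", "NUM"] : List String).contains p

-- ===== PORT A =====
-- A's for-loop over (results, current), flushing on a non-nominal token and once at the end.
def pvAGo (tp : List (String × String)) (m : Int) (results current : List String) : List String :=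
  match tp with
  | [] =>
      if current ≠ [] then
        let candidate := PySem.Str.strip (PySem.Str.join " " current)
        if m ≤ PySem.Str.len candidate then results ++ [candidate] else results
      else results
  | (text, pos) :: rest =>
      if pvNominal pos then pvAGo rest m results (current ++ [text])
      else
        if current ≠ [] then
          let candidate := PySem.Str.strip (PySem.Str.join " " current)
          pvAGo rest m (if m ≤ PySem.Str.len candidate then results ++ [candidate] else results) []
        else pvAGo rest m results []

def nominal_spans_from_pos_pairs (token_pairs : List (String × String)) (min_candidate_len : Int) : List String :=
  pvAGo token_pairs min_candidate_len [] []

-- ===== PORT B =====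
-- B's two-pointer scan: at a nominal token take the whole maximal nominal run, emit it, continue after it.
def pvBGo (tp : List (String × String)) (m : Int) : List String :=
  match tp with
  | [] => []
  | (text, pos) :: rest =>
      if pvNominal pos then
        let run := text :: (rest.takeWhile (fun q => pvNominal q.2)).map (·.1)
        let candidate := PySem.Str.strip (PySem.Str.join " " run)
        (if m ≤ PySem.Str.len candidate then [candidate] else []) ++
          pvBGo (rest.dropWhile (fun q => pvNominal q.2)) m
      else pvBGo rest m
termination_by tp.length
decreasing_by
  · exact Nat.lt_succ_of_le (List.length_dropWhile_le _ _)
  · simp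

def nominal_spans_from_pos_pairs_alt (token_pairs : List (String × String)) (min_candidate_len : Int) : List String :=
  pvBGo token_pairs min_candidate_len

-- ===== PRECONDITION & SPEC =====
def Spec_nominal_spans_from_pos_pairs (token_pairs : List (String × String)) (min_candidate_len : Int) (out : List String) : Prop := out = nominal_spans_from_pos_pairs_alt token_pairs min_candidate_len
instance (token_pairs : List (String × String)) (min_candidate_len : Int) (out : List String) : Decidable (Spec_nominal_spans_from_pos_pairs token_pairs min_candidate_len out) := by unfold Spec_nominal_spans_from_pos_pairs; infer_instance

-- ===== CLAIM (what is proved, stated in full; the proofs are below) =====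
def Claim_equal_nominal_spans_from_pos_pairs : Prop := ∀ (token_pairs : List (String × String)) (min_candidate_len : Int), Dom_nominal_spans_from_pos_pairs token_pairs min_candidate_len → Spec_nominal_spans_from_pos_pairs token_pairs min_candidate_len (nominal_spans_from_pos_pairs token_pairs min_candidate_len)

-- ===== LEMMAS AND PROOFS =====

-- emitted span of a run
def pvEmit (run : List String) (m : Int) : List String :=
  let candidate := PySem.Str.strip (PySem.Str.join " " run)
  if m ≤ PySem.Str.len candidate then [candidate] else []

-- A's loop with a result accumulator is the accumulator followed by the run with an empty one.
theorem pvAGo_acc : ∀ (tp : List (String × String)) (m : Int) (results current : List String),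
    pvAGo tp m results current = results ++ pvAGo tp m [] current := by
  intro tp
  induction tp with
  | nil =>
      intro m results current
      simp only [pvAGo]
      split_ifs <;> simp
  | cons hd rest ih =>
      intro m results current
      obtain ⟨t, p⟩ := hd
      by_cases hp : pvNominal p
      · simp only [pvAGo, if_pos hp]
        exact ih m results (current ++ [t])
      · by_cases hc : current = []
        · subst hc
          simp only [pvAGo, if_neg hp, ne_eq, not_true_eq_false, if_false]
          exact ih m results []
        · simp only [pvAGo, if_neg hp, if_pos hc]
          by_cases hm : m ≤ PySem.Str.len (PySem.Str.strip (PySem.Str.join " " current))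
          · rw [if_pos hm, if_pos hm, ih m (results ++ _) [], ih m ([] ++ _) []]
            simp
          · rw [if_neg hm, if_neg hm, ih m results []]

-- Main invariant, both parts at once by strong induction on the list length:
-- with empty `current` A's loop is B's scan, and with nonempty `current` A's loop
-- emits `current` extended by the leading nominal run and then scans the remainder.
theorem pvAGo_main (n : Nat) : ∀ (tp : List (String × String)), tp.length ≤ n → ∀ (m : Int),
    (pvAGo tp m [] [] = pvBGo tp m) ∧
    (∀ current : List String, current ≠ [] →
      pvAGo tp m [] current =
        pvEmit (current ++ (tp.takeWhile (fun q => pvNominal q.2)).map (·.1)) m ++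
          pvBGo (tp.dropWhile (fun q => pvNominal q.2)) m) := by
  induction n with
  | zero =>
      intro tp htp m
      match tp with
      | [] =>
          refine ⟨by simp [pvAGo, pvBGo], ?_⟩
          intro current hc
          simp only [pvAGo, pvBGo, pvEmit, List.takeWhile_nil, List.dropWhile_nil,
            List.map_nil, List.append_nil, if_pos hc]
          split_ifs <;> simp
      | _ :: _ => simp at htp
  | succ n ih =>
      intro tp htp m
      match tp with
      | [] =>
          refine ⟨by simp [pvAGo, pvBGo], ?_⟩
          intro current hc
          simp only [pvAGo, pvBGo, pvEmit, List.takeWhile_nil, List.dropWhile_nil,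
            List.map_nil, List.append_nil, if_pos hc]
          split_ifs <;> simp
      | (t, p) :: rest =>
          have hrest : rest.length ≤ n := by simpa using Nat.lt_succ_iff.mp (Nat.lt_of_lt_of_le (by simp) htp)
          constructor
          · -- empty current
            by_cases hp : pvNominal p
            · have h2 := ((ih rest hrest m).2) [t] (by simp)
              simp only [pvAGo, if_pos hp, List.nil_append] at h2 ⊢
              rw [h2]
              simp [pvBGo, pvEmit, hp]
            · have h1 := (ih rest hrest m).1
              simp only [pvAGo, if_neg hp, ne_eq, not_true_eq_false, if_false]
              rw [h1]
              simp [pvBGo, hp]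
          · intro current hc
            by_cases hp : pvNominal p
            · have h2 := ((ih rest hrest m).2) (current ++ [t]) (by simp)
              simp only [pvAGo, if_pos hp]
              rw [h2]
              simp [pvEmit, hp]
            · simp only [pvAGo, if_neg hp, if_pos hc]
              rw [pvAGo_acc, (ih rest hrest m).1]
              simp [pvEmit, pvBGo, hp]

-- ===== VERDICT (by name: the statement is the Claim_ definition above) =====
theorem nominal_spans_from_pos_pairs_spec : Claim_equal_nominal_spans_from_pos_pairs := by
  intro tp m _
  unfold Spec_nominal_spans_from_pos_pairs nominal_spans_from_pos_pairs nominal_spans_from_pos_pairs_alt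
  exact (pvAGo_main tp.length tp le_rfl m).1
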